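-- pv_equiv track=rewrite | github.com/jinarma/Python_General | hammingCode.py | make_the_temp_message_list
-- ===== SOURCE A (Python) =====
-- def make_the_temp_message_list(data_bits, number_parity_bits):
-- 	parity_bits_list = []
-- 	j = 1
-- 	# To set parity bits as '2' and put them in their locationation and '3' for data bits
-- 	for i in range(1, (len(data_bits)+number_parity_bits)+1):
-- 		if i == j:
-- 			parity_bits_list.append(2)
-- 			if j == 1:
-- 				j = j + 1
-- 			else:
-- 				j = j+j
-- 		else:
-- 			parity_bits_list.append(3)
--
-- 	return parity_bits_list
-- ===== SOURCE B (Python) =====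
-- def make_the_temp_message_list(data_bits, number_parity_bits):
--     n = len(data_bits) + number_parity_bits
--     result = [3] * n
--     p = 1
--     while p <= n:
--         result[p - 1] = 2
--         p *= 2
--     return result
-- ===== Notes on version B (the rewrite author's own statement) =====
-- stated objective: faster
-- what changed: Instead of scanning every position 1..n with an i==j parity-tracking branch, B bulk-fills [3]*n and then overwrites only the ~log2(n) power-of-two positions with 2.
import Mathlib
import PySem

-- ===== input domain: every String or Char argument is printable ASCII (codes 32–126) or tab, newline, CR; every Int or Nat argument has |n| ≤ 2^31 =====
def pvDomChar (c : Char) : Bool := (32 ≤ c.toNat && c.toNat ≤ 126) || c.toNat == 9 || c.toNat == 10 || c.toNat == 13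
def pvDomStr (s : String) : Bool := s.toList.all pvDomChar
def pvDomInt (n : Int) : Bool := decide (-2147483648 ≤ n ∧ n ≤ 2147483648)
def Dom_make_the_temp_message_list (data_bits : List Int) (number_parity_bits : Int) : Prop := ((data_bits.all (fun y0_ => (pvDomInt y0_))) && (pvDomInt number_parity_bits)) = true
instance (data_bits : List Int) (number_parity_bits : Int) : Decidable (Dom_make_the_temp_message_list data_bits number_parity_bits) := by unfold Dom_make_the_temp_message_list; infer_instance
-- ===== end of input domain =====

-- B bulk-fills the list with 3 and overwrites only the power-of-two positions with 2,
-- instead of A's per-index scan with an i==j branch; return values proved equal.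

-- ===== PORT A =====
-- the for-loop of A, one recursive call per index i of the range, state = (acc, j)
def pvLoopA (xs : List Int) (acc : List Int) (j : Int) : List Int :=
  match xs with
  | [] => acc
  | i :: rest =>
    if i = j then pvLoopA rest (acc ++ [2]) (if j = 1 then j + 1 else j + j)
    else pvLoopA rest (acc ++ [3]) j

def make_the_temp_message_list (data_bits : List Int) (number_parity_bits : Int) : List Int :=
  pvLoopA (PySem.List.pyRange 1 (((data_bits.length : Int) + number_parity_bits) + 1) 1) [] 1

-- ===== PORT B =====
-- the while-loop of B: overwrite position p-1 with 2 while p ≤ n, doubling p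
-- (the '1 ≤ p' conjunct only makes the recursion total; p starts at 1 and doubles, so it always holds)
def pvSetPows (res : List Int) (p n : Int) : List Int :=
  if h : 1 ≤ p ∧ p ≤ n then pvSetPows (res.set (p - 1).toNat 2) (2 * p) n else res
termination_by (n + 1 - p).toNat
decreasing_by omega

def make_the_temp_message_list_alt (data_bits : List Int) (number_parity_bits : Int) : List Int :=
  let n : Int := (data_bits.length : Int) + number_parity_bits
  pvSetPows (List.replicate n.toNat 3) 1 n

-- ===== PRECONDITION & SPEC =====
def Spec_make_the_temp_message_list (data_bits : List Int) (number_parity_bits : Int) (out : List Int) : Prop := out = make_the_temp_message_list_alt data_bits number_parity_bits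
instance (data_bits : List Int) (number_parity_bits : Int) (out : List Int) : Decidable (Spec_make_the_temp_message_list data_bits number_parity_bits out) := by unfold Spec_make_the_temp_message_list; infer_instance

-- ===== CLAIM (what is proved, stated in full; the proofs are below) =====
def Claim_equal_make_the_temp_message_list : Prop := ∀ (data_bits : List Int) (number_parity_bits : Int), Dom_make_the_temp_message_list data_bits number_parity_bits → Spec_make_the_temp_message_list data_bits number_parity_bits (make_the_temp_message_list data_bits number_parity_bits)

-- ===== LEMMAS AND PROOFS =====

-- Boolean power-of-two test used only in the proofs
def pow2b : Nat → Bool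
  | 0 => false
  | 1 => true
  | n + 2 => (decide ((n + 2) % 2 = 0)) && pow2b ((n + 2) / 2)
decreasing_by omega

lemma pow2b_iff (m : Nat) : pow2b m = true ↔ ∃ t : Nat, m = 2 ^ t := by
  fun_induction pow2b with
  | case1 =>
    constructor
    · intro h; cases h
    · rintro ⟨t, ht⟩; have := Nat.one_le_two_pow (n := t); omega
  | case2 => exact ⟨fun _ => ⟨0, rfl⟩, fun _ => rfl⟩
  | case3 n ih =>
    simp only [Bool.and_eq_true, decide_eq_true_eq, ih]
    constructor
    · rintro ⟨he, t, ht⟩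
      exact ⟨t + 1, by rw [pow_succ]; omega⟩
    · rintro ⟨t, ht⟩
      rcases t with _ | t
      · omega
      · rw [pow_succ] at ht
        refine ⟨by omega, t, by omega⟩

-- element value recorded by A at index i, as a function of i alone
def fA (x : Int) : Int := if pow2b x.toNat then 2 else 3

lemma loopA_eq (d : Nat) : ∀ (i n : Int) (acc : List Int) (t : Nat),
    (n + 1 - i).toNat = d → 1 ≤ i → i ≤ 2 ^ t → (2 : Int) ^ t < 2 * i →
    pvLoopA (PySem.List.pyRange i (n + 1) 1) acc ((2 : Int) ^ t) =
      acc ++ (PySem.List.pyRange i (n + 1) 1).map fA := by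
  induction d using Nat.strong_induction_on with
  | _ d ih =>
    intro i n acc t hd h1 h2 h3
    by_cases hlt : i < n + 1
    · rw [PySem.List.pyRange_one_cons hlt]
      by_cases hij : i = (2 : Int) ^ t
      · subst hij
        have hcast : ((2 ^ t : Nat) : Int) = (2 : Int) ^ t := by push_cast; ring
        have hpow : pow2b ((2 : Int) ^ t).toNat = true := by
          rw [pow2b_iff]
          exact ⟨t, by omega⟩
        have hnewj : (if (2 : Int) ^ t = 1 then (2:Int) ^ t + 1 else (2:Int) ^ t + (2:Int) ^ t) = (2 : Int) ^ (t + 1) := by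
          rcases Nat.eq_zero_or_pos t with h0 | hpos
          · subst h0; norm_num
          · have : (1:Int) < 2 ^ t := by
              calc (1:Int) < 2 ^ 1 := by norm_num
              _ ≤ 2 ^ t := by exact pow_le_pow_right₀ (by norm_num) hpos
            rw [if_neg (by omega)]; ring
        have h2t : (1:Int) ≤ 2 ^ t := one_le_pow₀ (by norm_num)
        simp only [pvLoopA, List.map_cons, fA, hpow, if_pos]
        rw [hnewj, ih (n + 1 - ((2:Int) ^ t + 1)).toNat (by omega) ((2:Int) ^ t + 1) n _ (t+1) rfl
          (by omega) (by rw [pow_succ]; omega) (by rw [pow_succ]; omega)]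
        simp
      · have hij' : i < 2 ^ t := lt_of_le_of_ne h2 hij
        have hpow : pow2b i.toNat = false := by
          by_contra hc
          have hc' : pow2b i.toNat = true := by revert hc; cases pow2b i.toNat <;> simp
          obtain ⟨s, hs⟩ := (pow2b_iff _).mp hc'
          have hcs : ((2 ^ s : Nat) : Int) = (2 : Int) ^ s := by push_cast; ring
          have hiInt : i = (2 : Int) ^ s := by omega
          have hst : s < t := (pow_lt_pow_iff_right₀ (by norm_num : (1:Int) < 2)).mp (hiInt ▸ hij')
          have hle : (2 : Int) ^ (s + 1) ≤ 2 ^ t := pow_le_pow_right₀ (by norm_num) (by omega)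
          rw [pow_succ] at hle
          rw [hiInt] at h3
          omega
        simp only [pvLoopA, if_neg hij, List.map_cons, fA, hpow, Bool.false_eq_true, if_false]
        rw [ih (n + 1 - (i+1)).toNat (by omega) (i+1) n _ t rfl (by omega) (by omega) (by omega)]
        simp
    · rw [PySem.List.pyRange_one_eq_nil (by omega)]
      simp [pvLoopA]

lemma length_pvSetPows (res : List Int) (p n : Int) :
    (pvSetPows res p n).length = res.length := by
  fun_induction pvSetPows <;> simp_all [List.length_set]

lemma getElem?_pvSetPows (d : Nat) : ∀ (res : List Int) (p n : Int) (t k : Nat),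
    (n + 1 - p).toNat = d → p = (2 : Int) ^ t → res.length = n.toNat → (k : Int) < n →
    (pvSetPows res p n)[k]? =
      if p ≤ (k : Int) + 1 ∧ pow2b (k + 1) = true then some 2 else res[k]? := by
  induction d using Nat.strong_induction_on with
  | _ d ih =>
    intro res p n t k hd hp hlen hk
    have hc2t : ((2 ^ t : Nat) : Int) = (2 : Int) ^ t := by push_cast; ring
    have hp1 : (1:Int) ≤ p := by rw [hp]; exact one_le_pow₀ (by norm_num)
    rw [pvSetPows]
    by_cases hpn : p ≤ n
    · rw [dif_pos ⟨hp1, hpn⟩]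
      rw [ih (n + 1 - 2*p).toNat (by omega) _ (2*p) n (t+1) k rfl (by rw [hp]; ring)
        (by simpa using hlen) hk]
      by_cases hc2 : 2 * p ≤ (k : Int) + 1 ∧ pow2b (k + 1) = true
      · rw [if_pos hc2, if_pos ⟨by omega, hc2.2⟩]
      · rw [if_neg hc2]
        by_cases hc1 : p ≤ (k : Int) + 1 ∧ pow2b (k + 1) = true
        · -- then k+1 = p: exactly the position this iteration sets
          obtain ⟨s, hs⟩ := (pow2b_iff _).mp hc1.2
          have hcs : ((2 ^ s : Nat) : Int) = (2 : Int) ^ s := by push_cast; ring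
          have hks : (k : Int) + 1 = (2 : Int) ^ s := by omega
          have hklt : (k : Int) + 1 < 2 * p := by
            rcases lt_or_ge ((k:Int) + 1) (2 * p) with h | h
            · exact h
            · exact absurd ⟨h, hc1.2⟩ hc2
          have hge : (2 : Int) ^ t ≤ 2 ^ s := by have := hc1.1; rw [hp] at this; omega
          have hlt2 : (2 : Int) ^ s < 2 ^ (t + 1) := by rw [pow_succ]; rw [hp] at hklt; omega
          have hts : t ≤ s := (pow_le_pow_iff_right₀ (by norm_num : (1:Int) < 2)).mp hge
          have hst : s < t + 1 := (pow_lt_pow_iff_right₀ (by norm_num : (1:Int) < 2)).mp hlt2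
          have hse : s = t := by omega
          subst hse
          have hke : (k : Int) + 1 = p := by rw [hp]; omega
          rw [if_pos hc1]
          have hki : k = (p - 1).toNat := by omega
          subst hki
          rw [List.getElem?_set_self (by omega)]
        · rw [if_neg hc1]
          have hne : (p - 1).toNat ≠ k := by
            intro hh
            exact hc1 ⟨by omega, (pow2b_iff _).mpr ⟨t, by omega⟩⟩
          rw [List.getElem?_set_ne hne]
    · rw [dif_neg (by omega)]
      rw [if_neg (by rintro ⟨h1, _⟩; omega)]

-- ===== VERDICT (by name: the statement is the Claim_ definition above) =====
theorem make_the_temp_message_list_spec : Claim_equal_make_the_temp_message_list := by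
  intro data_bits number_parity_bits _
  unfold Spec_make_the_temp_message_list make_the_temp_message_list make_the_temp_message_list_alt
  set n : Int := (data_bits.length : Int) + number_parity_bits with hn
  have hA : pvLoopA (PySem.List.pyRange 1 (n + 1) 1) [] 1 =
      (PySem.List.pyRange 1 (n + 1) 1).map fA := by
    have h := loopA_eq (n + 1 - 1).toNat 1 n [] 0 (by norm_num) (by norm_num) (by norm_num)
      (by norm_num)
    simpa using h
  rw [hA]
  show _ = pvSetPows (List.replicate n.toNat 3) 1 n
  apply List.ext_getElem?
  intro k
  by_cases hk : k < n.toNat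
  · have hB := getElem?_pvSetPows (n + 1 - 1).toNat (List.replicate n.toNat 3) 1 n 0 k rfl
      (by norm_num) (by simp) (by omega)
    rw [hB, List.getElem?_map, PySem.List.getElem?_pyRange_one,
      if_pos (show k < ((n + 1) - 1).toNat by omega)]
    simp only [Option.map_some]
    rw [List.getElem?_replicate, if_pos hk]
    have harg : ((1 : Int) + (k : Int)).toNat = k + 1 := by omega
    by_cases hp : pow2b (k + 1) = true
    · rw [if_pos ⟨by omega, hp⟩, fA, harg, if_pos hp]
    · rw [if_neg (by rintro ⟨_, h⟩; exact hp h), fA, harg,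
        if_neg (by simp [hp])]
  · have h1 : ((PySem.List.pyRange 1 (n + 1) 1).map fA).length ≤ k := by
      simp [PySem.List.length_pyRange_one]; omega
    have h2 : (pvSetPows (List.replicate n.toNat 3) 1 n).length ≤ k := by
      rw [length_pvSetPows]; simp; omega
    rw [List.getElem?_eq_none h1, List.getElem?_eq_none h2]
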